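-- pv_equiv track=rewrite | github.com/JohnZhongyaoZhang/Wizard101-Min-Maxer | VanguardDamageMinMaxv1.py | howtoaddjewels
-- ===== SOURCE A (Python) =====
-- def howtoaddjewels(pips,accuracy):
--     jewels = {"Power Pip": 0, "Accuracy": 0}
--     totaljewels = 0
--     while totaljewels < 2:
--         if accuracy < 100 or pips >= 100:
--             accuracy+=16
--             jewels["Accuracy"]+=1
--             totaljewels+=1
--         elif pips < 100:
--             pips+=10
--             jewels["Power Pip"]+=1
--             totaljewels+=1
--     return jewels
-- ===== SOURCE B (Python) =====
-- def howtoaddjewels(pips, accuracy):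
--     # Closed-form case analysis on the initial (accuracy, pips); no loop, no mutable state.
--     if accuracy >= 100 and pips < 100:
--         # first jewel is a Power Pip; second depends on whether pips+10 reaches 100
--         if pips < 90:
--             return {"Power Pip": 2, "Accuracy": 0}
--         return {"Power Pip": 1, "Accuracy": 1}
--     # first jewel is Accuracy; second depends on accuracy+16 and pips
--     if accuracy < 84 or pips >= 100:
--         return {"Power Pip": 0, "Accuracy": 2}
--     return {"Power Pip": 1, "Accuracy": 1}
-- ===== Notes on version B (the rewrite author's own statement) =====
-- stated objective: simpler
-- what changed: Replaced the two-iteration while loop with mutable dict/counter state by a direct closed-form case analysis on the initial (accuracy, pips) returning literal dicts (thresholds 90 and 84 come from the +10/+16 shifts).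
import Mathlib
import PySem

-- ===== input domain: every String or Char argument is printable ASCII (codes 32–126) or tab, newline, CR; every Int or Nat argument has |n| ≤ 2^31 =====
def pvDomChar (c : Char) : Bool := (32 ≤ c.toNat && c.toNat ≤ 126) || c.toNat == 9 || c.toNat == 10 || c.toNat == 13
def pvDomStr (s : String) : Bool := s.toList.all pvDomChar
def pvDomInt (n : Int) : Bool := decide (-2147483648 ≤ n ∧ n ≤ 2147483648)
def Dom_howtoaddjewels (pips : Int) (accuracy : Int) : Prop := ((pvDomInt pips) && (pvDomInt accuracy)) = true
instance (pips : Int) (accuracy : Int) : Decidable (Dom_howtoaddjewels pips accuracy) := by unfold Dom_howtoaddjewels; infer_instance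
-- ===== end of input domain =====

-- B replaces A's two-pass while loop over a mutable dict with a closed-form case analysis on the
-- initial (accuracy, pips); objective: simpler.

-- ===== PORT A =====
-- the while loop: fuel = 2 - totaljewels (each reachable iteration increments totaljewels by 1)
def howtoaddjewelsLoop (fuel : Nat) (pips accuracy : Int)
    (jewels : PySem.Dict String Int) : PySem.Dict String Int :=
  match fuel with
  | 0 => jewels
  | n + 1 =>
    if accuracy < 100 ∨ pips ≥ 100 then
      howtoaddjewelsLoop n pips (accuracy + 16) (jewels.modify "Accuracy" 0 (· + 1))
    else if pips < 100 then
      howtoaddjewelsLoop n (pips + 10) accuracy (jewels.modify "Power Pip" 0 (· + 1))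
    else
      -- unreachable: the two guards cover all integers, so the Python loop always makes progress
      jewels

def howtoaddjewels (pips : Int) (accuracy : Int) : List (String × Int) :=
  (howtoaddjewelsLoop 2 pips accuracy
    (PySem.Dict.ofList [("Power Pip", 0), ("Accuracy", 0)])).items

-- ===== PORT B =====
def howtoaddjewels_alt (pips : Int) (accuracy : Int) : List (String × Int) :=
  if accuracy ≥ 100 ∧ pips < 100 then
    if pips < 90 then [("Power Pip", 2), ("Accuracy", 0)]
    else [("Power Pip", 1), ("Accuracy", 1)]
  else
    if accuracy < 84 ∨ pips ≥ 100 then [("Power Pip", 0), ("Accuracy", 2)]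
    else [("Power Pip", 1), ("Accuracy", 1)]

-- ===== PRECONDITION & SPEC =====
def Spec_howtoaddjewels (pips : Int) (accuracy : Int) (out : List (String × Int)) : Prop := out = howtoaddjewels_alt pips accuracy
instance (pips : Int) (accuracy : Int) (out : List (String × Int)) : Decidable (Spec_howtoaddjewels pips accuracy out) := by unfold Spec_howtoaddjewels; infer_instance

-- ===== CLAIM (what is proved, stated in full; the proofs are below) =====
def Claim_equal_howtoaddjewels : Prop := ∀ (pips : Int) (accuracy : Int), Dom_howtoaddjewels pips accuracy → Spec_howtoaddjewels pips accuracy (howtoaddjewels pips accuracy)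

-- ===== LEMMAS AND PROOFS =====

-- ===== VERDICT (by name: the statement is the Claim_ definition above) =====
theorem howtoaddjewels_spec : Claim_equal_howtoaddjewels := by
  intro pips accuracy _
  unfold Spec_howtoaddjewels howtoaddjewels howtoaddjewels_alt
  simp only [howtoaddjewelsLoop]
  split_ifs <;> first | rfl | omega
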